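-- pv_equiv track=rewrite | github.com/endaniel1/Aprendiendo_Python | Graficos/Calculadora/Ejercicio_Calculadora.py | comprobarComa
-- ===== SOURCE A (Python) =====
-- def comprobarComa(num):
--
-- 	saberCuantasComas=0
-- 	devolverNumero=""
--
-- 	for i in range(len(num)):
--
-- 		if num[i] != ".":
--
-- 			devolverNumero=devolverNumero+num[i]
--
-- 		elif num[i] ==".":
--
-- 			if saberCuantasComas < 1:
-- 				devolverNumero=devolverNumero+num[i]
-- 				saberCuantasComas+=1
-- 			else:
-- 				break
--
-- 	return devolverNumero
-- ===== SOURCE B (Python) =====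
-- def comprobarComa(num):
--     first = num.find('.')
--     if first == -1:
--         return num
--     second = num.find('.', first + 1)
--     if second == -1:
--         return num
--     return num[:second]
-- ===== Notes on version B (the rewrite author's own statement) =====
-- stated objective: simpler
-- what changed: B locates the first and second dot with str.find and returns the slice num[:second], instead of accumulating characters one by one with a dot counter and a break.
import Mathlib
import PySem

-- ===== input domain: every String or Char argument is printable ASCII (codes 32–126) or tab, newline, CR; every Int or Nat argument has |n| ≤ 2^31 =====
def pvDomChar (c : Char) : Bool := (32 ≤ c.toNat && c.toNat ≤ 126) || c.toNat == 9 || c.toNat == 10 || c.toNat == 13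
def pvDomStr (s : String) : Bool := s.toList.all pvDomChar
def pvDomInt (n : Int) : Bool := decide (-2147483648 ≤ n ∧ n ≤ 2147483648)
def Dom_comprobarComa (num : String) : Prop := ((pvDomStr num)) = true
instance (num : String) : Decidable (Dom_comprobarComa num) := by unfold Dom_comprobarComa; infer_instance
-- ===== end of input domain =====

-- B is a simpler re-implementation: it locates the first and second dot with str.find
-- and returns the slice num[:second], instead of accumulating characters with a counter and break.

-- ===== PORT A =====
-- the for-loop over the characters of num, with the dot counter and the break ported as
-- structural recursion returning [] (the accumulated suffix stops there)
def pvGoA : List Char → Nat → List Char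
  | [], _ => []
  | c :: rest, saberCuantasComas =>
    if c ≠ '.' then c :: pvGoA rest saberCuantasComas
    else if saberCuantasComas < 1 then c :: pvGoA rest (saberCuantasComas + 1)
    else []

def comprobarComa (num : String) : String := String.ofList (pvGoA num.toList 0)

-- ===== PORT B =====
def comprobarComa_alt (num : String) : String :=
  let first := PySem.Str.find num "."
  if first = -1 then num
  else
    let second := PySem.Str.findFrom num "." (first + 1)
    if second = -1 then num
    else PySem.Str.slice num none (some second)

-- ===== PRECONDITION & SPEC =====
def Spec_comprobarComa (num : String) (out : String) : Prop := out = comprobarComa_alt num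
instance (num : String) (out : String) : Decidable (Spec_comprobarComa num out) := by unfold Spec_comprobarComa; infer_instance

-- ===== CLAIM (what is proved, stated in full; the proofs are below) =====
def Claim_equal_comprobarComa : Prop := ∀ (num : String), Dom_comprobarComa num → Spec_comprobarComa num (comprobarComa num)

-- ===== LEMMAS AND PROOFS =====

theorem pv_singleton_prefix (c : Char) (l : List Char) : [c] <+: l ↔ l.head? = some c := by
  cases l with
  | nil => simp
  | cons x t => simp [List.cons_prefix_cons, eq_comm]

theorem pv_mem_iff_infix (c : Char) (l : List Char) : c ∈ l ↔ [c] <:+: l := by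
  constructor
  · intro h
    obtain ⟨s, t, rfl⟩ := List.append_of_mem h
    exact ⟨s, t, by simp⟩
  · intro h
    exact h.sublist.subset (by simp)

theorem pv_find_neg (l : List Char) (h : '.' ∉ l) : PySem.Chars.find l ['.'] = -1 := by
  rw [PySem.Chars.find_eq_neg_one_iff]
  exact fun hi => h ((pv_mem_iff_infix '.' l).2 hi)

theorem pv_find_pos (a b : List Char) (ha : '.' ∉ a) :
    PySem.Chars.find (a ++ '.' :: b) ['.'] = (a.length : Int) := by
  set s := a ++ '.' :: b with hs
  have hinf : ['.'] <:+: s := ⟨a, b, by simp [hs]⟩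
  have h0 : 0 ≤ PySem.Chars.find s ['.'] := (PySem.Chars.find_nonneg_iff s ['.']).2 hinf
  obtain ⟨hpre, hmin⟩ := PySem.Chars.find_spec h0
  set i := (PySem.Chars.find s ['.']).toNat with hi
  have hhead : (s.drop i).head? = some '.' := (pv_singleton_prefix _ _).1 hpre
  have hgi : s[i]? = some '.' := by rwa [← List.head?_drop]
  have h1 : ¬ i < a.length := by
    intro hlt
    have : s[i]? = a[i]? := List.getElem?_append_left hlt
    rw [hgi] at this
    have : '.' ∈ a := by
      have := List.getElem?_eq_some_iff.1 this.symm
      obtain ⟨hlen, heq⟩ := this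
      exact heq ▸ List.getElem_mem _
    exact ha this
  have h2 : ¬ a.length < i := by
    intro hlt
    apply hmin a.length hlt
    rw [pv_singleton_prefix, List.head?_drop]
    simp [hs]
  have : i = a.length := by omega
  omega

theorem pv_goA_no_dot (b : List Char) (k : Nat) (h : '.' ∉ b) : pvGoA b k = b := by
  induction b with
  | nil => simp [pvGoA]
  | cons c t ih =>
    have hc : c ≠ '.' := fun hc => h (hc ▸ List.mem_cons_self)
    simp only [pvGoA, if_pos hc]
    rw [ih (fun ht => h (List.mem_cons_of_mem _ ht))]

theorem pv_goA_one (c d : List Char) (h : '.' ∉ c) : pvGoA (c ++ '.' :: d) 1 = c := by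
  induction c with
  | nil => simp [pvGoA]
  | cons x t ih =>
    have hx : x ≠ '.' := fun hx => h (hx ▸ List.mem_cons_self)
    simp only [List.cons_append, pvGoA, if_pos hx]
    rw [ih (fun ht => h (List.mem_cons_of_mem _ ht))]

theorem pv_goA_zero (a b : List Char) (h : '.' ∉ a) :
    pvGoA (a ++ '.' :: b) 0 = a ++ '.' :: pvGoA b 1 := by
  induction a with
  | nil => simp [pvGoA]
  | cons x t ih =>
    have hx : x ≠ '.' := fun hx => h (hx ▸ List.mem_cons_self)
    simp only [List.cons_append, pvGoA, if_pos hx]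
    rw [ih (fun ht => h (List.mem_cons_of_mem _ ht))]

theorem pv_first_split (l : List Char) (h : '.' ∈ l) :
    ∃ a b, l = a ++ '.' :: b ∧ '.' ∉ a := by
  induction l with
  | nil => cases h
  | cons x t ih =>
    by_cases hx : x = '.'
    · exact ⟨[], t, by simp [hx], by simp⟩
    · obtain ⟨a, b, rfl, ha⟩ := ih (by cases h with
        | head => exact absurd rfl hx
        | tail _ ht => exact ht)
      exact ⟨x :: a, b, by simp, by simp [ha, Ne.symm hx]⟩

theorem pv_dot_toList : (".").toList = ['.'] := rfl

-- ===== VERDICT (by name: the statement is the Claim_ definition above) =====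
theorem comprobarComa_spec : Claim_equal_comprobarComa := by
  intro num _
  unfold Spec_comprobarComa comprobarComa comprobarComa_alt
  by_cases h : '.' ∈ num.toList
  · obtain ⟨a, b, hcs, ha⟩ := pv_first_split num.toList h
    have hfind : PySem.Str.find num "." = (a.length : Int) := by
      rw [PySem.Str.find_eq, pv_dot_toList, hcs, pv_find_pos a b ha]
    have hne : (a.length : Int) ≠ -1 := by omega
    rw [hfind]
    simp only [if_neg hne]
    have hk : a.length + 1 ≤ num.toList.length := by
      rw [hcs]; simp
    have hdrop : num.toList.drop (a.length + 1) = b := by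
      rw [hcs, show a ++ '.' :: b = (a ++ ['.']) ++ b by simp,
        show a.length + 1 = (a ++ ['.']).length by simp, List.drop_left]
    have hfrom : PySem.Str.findFrom num "." ((a.length : Int) + 1) none =
        if PySem.Chars.find b ['.'] = -1 then -1
        else ((a.length + 1 : Nat) : Int) + PySem.Chars.find b ['.'] := by
      rw [PySem.Str.findFrom_eq, pv_dot_toList,
        show ((a.length : Int) + 1) = ((a.length + 1 : Nat) : Int) by push_cast; ring,
        PySem.Chars.findFrom_natCast _ _ _ hk, hdrop]
    by_cases hb : '.' ∈ b
    · obtain ⟨c, d, hb2, hc⟩ := pv_first_split b hb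
      have hfb : PySem.Chars.find b ['.'] = (c.length : Int) := by
        rw [hb2, pv_find_pos c d hc]
      have hsec : PySem.Str.findFrom num "." ((a.length : Int) + 1) none =
          ((a.length + 1 + c.length : Nat) : Int) := by
        rw [hfrom, hfb, if_neg (by omega)]
        push_cast; ring
      have hne2 : ((a.length + 1 + c.length : Nat) : Int) ≠ -1 := by omega
      rw [hsec, if_neg hne2]
      -- A's value: a ++ '.' :: c ; B's value: take (a.length+1+c.length) of num.toList
      have hA : pvGoA num.toList 0 = a ++ '.' :: c := by
        rw [hcs, pv_goA_zero a b ha, hb2, pv_goA_one c d hc]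
      have hBlist : (PySem.Str.slice num none (some ((a.length + 1 + c.length : Nat) : Int))).toList
          = a ++ '.' :: c := by
        rw [PySem.Str.toList_slice, PySem.Chars.slice_eq_listSlice,
          PySem.List.slice_to_natCast, hcs, hb2]
        simp [List.take_append, show a.length + 1 + c.length - a.length = c.length + 1 by omega,
          show a.length ≤ a.length + 1 + c.length by omega]
      rw [hA, ← String.ofList_toList
        (s := PySem.Str.slice num none (some ((a.length + 1 + c.length : Nat) : Int))), hBlist]
    · have hfb : PySem.Chars.find b ['.'] = -1 := pv_find_neg b hb
      rw [hfrom, hfb, if_pos rfl, if_pos rfl]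
      have hA : pvGoA num.toList 0 = num.toList := by
        rw [hcs, pv_goA_zero a b ha, pv_goA_no_dot b 1 hb, ← hcs]
      rw [hA, String.ofList_toList]
  · have hfind : PySem.Str.find num "." = -1 := by
      rw [PySem.Str.find_eq, pv_dot_toList, pv_find_neg _ h]
    rw [hfind, if_pos rfl, pv_goA_no_dot _ 0 h, String.ofList_toList]
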